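-- pv_equiv track=rewrite | github.com/MrBrantCode/unitest_baseline | mut_generate/mist_train_taco/taco_6592/solution.py | is_funny_string
-- ===== SOURCE A (Python) =====
-- def is_funny_string(s: str) -> str:
--     """
--     Determines if a given string is "Funny" based on the condition that the absolute difference
--     between consecutive characters in the string is equal to the absolute difference between
--     consecutive characters in the reversed string.
--
--     Parameters:
--     s (str): The input string to be checked.
--
--     Returns:
--     str: "Funny" if the string meets the condition, otherwise "Not Funny".
--     """
--     if len(s) < 2:
--         return "Not Funny"
--
--     reverse_s = s[::-1]
--
--     for i in range(1, len(s)):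
--         if abs(ord(s[i]) - ord(s[i - 1])) != abs(ord(reverse_s[i]) - ord(reverse_s[i - 1])):
--             return "Not Funny"
--
--     return "Funny"
-- ===== SOURCE B (Python) =====
-- def is_funny_string(s: str) -> str:
--     # Two-pointer check: walk one index from each end toward the middle and
--     # compare the adjacent-difference at the front with the one at the back;
--     # no reversed string and no difference table is ever built, and only half
--     # as many comparisons are made.
--     if len(s) < 2:
--         return "Not Funny"
--     i, j = 0, len(s) - 1
--     while i < j:
--         if abs(ord(s[i + 1]) - ord(s[i])) != abs(ord(s[j]) - ord(s[j - 1])):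
--             return "Not Funny"
--         i += 1
--         j -= 1
--     return "Funny"
-- ===== Notes on version B (the rewrite author's own statement) =====
-- stated objective: alternative
-- what changed: Replaces A's build-the-reversed-string-and-scan-all-n-positions pass with a two-pointer loop that moves inward from both ends, comparing the front adjacent difference with the back one and stopping at the middle, so no reversed copy is made and only half the comparisons run.
import Mathlib
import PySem

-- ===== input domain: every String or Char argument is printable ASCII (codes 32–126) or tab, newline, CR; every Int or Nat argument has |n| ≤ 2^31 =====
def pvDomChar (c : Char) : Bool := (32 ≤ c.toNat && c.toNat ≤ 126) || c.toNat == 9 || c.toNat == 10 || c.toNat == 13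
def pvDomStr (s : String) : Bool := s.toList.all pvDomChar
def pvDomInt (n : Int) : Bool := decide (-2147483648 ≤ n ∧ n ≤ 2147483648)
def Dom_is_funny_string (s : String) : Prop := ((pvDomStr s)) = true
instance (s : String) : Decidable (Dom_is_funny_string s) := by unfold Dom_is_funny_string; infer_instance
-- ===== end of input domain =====

-- B replaces A's reversed-string full scan with a two-pointer loop walking inward from
-- both ends (half the comparisons, no reversed copy); same return value everywhere
-- (objective: alternative).


-- ===== PORT A =====
def is_funny_string (s : String) : String :=
  let l := s.toList
  if l.length < 2 then "Not Funny"
  else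
    let r := l.reverse
    if (PySem.List.pyRange 1 l.length 1).all (fun i =>
        (((PySem.List.pyGetD l i ' ').toNat : Int) - ((PySem.List.pyGetD l (i - 1) ' ').toNat : Int)).natAbs
          == (((PySem.List.pyGetD r i ' ').toNat : Int) - ((PySem.List.pyGetD r (i - 1) ' ').toNat : Int)).natAbs)
    then "Funny" else "Not Funny"

-- ===== PORT B =====
-- the while loop of Source B; inside the loop i+1, i, j, j-1 are always valid
-- nonnegative indices (0 ≤ i < j ≤ len-1), so List.getD is exact for Python's s[k]
def pvLoop (l : List Char) (i j : Nat) : Bool :=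
  if i < j then
    if (((l.getD (i + 1) ' ').toNat : Int) - ((l.getD i ' ').toNat : Int)).natAbs
        == (((l.getD j ' ').toNat : Int) - ((l.getD (j - 1) ' ').toNat : Int)).natAbs
    then pvLoop l (i + 1) (j - 1)
    else false
  else true
termination_by j - i

def is_funny_string_alt (s : String) : String :=
  let l := s.toList
  if l.length < 2 then "Not Funny"
  else if pvLoop l 0 (l.length - 1) then "Funny" else "Not Funny"

-- ===== PRECONDITION & SPEC =====
def Spec_is_funny_string (s : String) (out : String) : Prop := out = is_funny_string_alt s
instance (s : String) (out : String) : Decidable (Spec_is_funny_string s out) := by unfold Spec_is_funny_string; infer_instance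

-- ===== CLAIM (what is proved, stated in full; the proofs are below) =====
def Claim_equal_is_funny_string : Prop := ∀ (s : String), Dom_is_funny_string s → Spec_is_funny_string s (is_funny_string s)

-- ===== LEMMAS AND PROOFS =====

-- the list of absolute consecutive differences (proof device; neither port builds it)
def pvDiffs (l : List Char) : List Nat :=
  List.zipWith (fun a b => ((a.toNat : Int) - (b.toNat : Int)).natAbs) l.tail l

theorem pvDiffs_length (l : List Char) : (pvDiffs l).length = l.length - 1 := by
  simp [pvDiffs]

theorem pvDiffs_getElem (l : List Char) (j : Nat) (hj : j < (pvDiffs l).length) :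
    (pvDiffs l)[j] =
      (((l[j + 1]'(by have := pvDiffs_length l; omega)).toNat : Int) -
        ((l[j]'(by have := pvDiffs_length l; omega)).toNat : Int)).natAbs := by
  simp [pvDiffs, List.getElem_zipWith, List.getElem_tail]

theorem pvDiffs_getD (l : List Char) (j : Nat) (hj : j < l.length - 1) :
    (pvDiffs l).getD j 0 =
      (((l.getD (j + 1) ' ').toNat : Int) - ((l.getD j ' ').toNat : Int)).natAbs := by
  rw [List.getD_eq_getElem _ _ (by rw [pvDiffs_length]; omega),
      pvDiffs_getElem l j (by rw [pvDiffs_length]; omega),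
      List.getD_eq_getElem l ' ' (by omega), List.getD_eq_getElem l ' ' (by omega)]

theorem pv_getD_reverse {A : Type} (l : List A) (i : Nat) (d : A) (h : i < l.length) :
    l.reverse.getD i d = l.getD (l.length - 1 - i) d := by
  rw [List.getD_eq_getElem _ _ (by simpa using h), List.getD_eq_getElem _ _ (by omega),
      List.getElem_reverse]

theorem pv_palindrome_iff (d : List Nat) :
    d = d.reverse ↔ ∀ j, j < d.length → d.getD j 0 = d.getD (d.length - 1 - j) 0 := by
  constructor
  · intro h j hj
    conv_lhs => rw [h]
    exact pv_getD_reverse d j 0 hj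
  · intro hp
    apply List.ext_getElem (by simp)
    intro j h1 h2
    rw [← List.getD_eq_getElem d 0 h1, ← List.getD_eq_getElem d.reverse 0 h2,
        pv_getD_reverse d j 0 h1]
    exact hp j h1

-- half of the mirror equalities already force the whole palindrome
theorem pv_half_palindrome (d : List Nat) :
    d = d.reverse ↔ ∀ k, 2 * k < d.length → d.getD k 0 = d.getD (d.length - 1 - k) 0 := by
  rw [pv_palindrome_iff]
  constructor
  · intro h k hk; exact h k (by omega)
  · intro h j hj
    by_cases hhalf : 2 * j < d.length
    · exact h j hhalf
    · have hk := h (d.length - 1 - j) (by omega)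
      rw [show d.length - 1 - (d.length - 1 - j) = j from by omega] at hk
      exact hk.symm

-- A-side: one pyRange step equals one mirror equality of the diff list
theorem pv_step (l : List Char) (k : Nat) (hk : k < l.length - 1) :
    (((((PySem.List.pyGetD l (1 + (k : Int)) ' ').toNat : Int) -
        ((PySem.List.pyGetD l (1 + (k : Int) - 1) ' ').toNat : Int)).natAbs
      == (((PySem.List.pyGetD l.reverse (1 + (k : Int)) ' ').toNat : Int) -
        ((PySem.List.pyGetD l.reverse (1 + (k : Int) - 1) ' ').toNat : Int)).natAbs) = true)
    ↔ (pvDiffs l).getD k 0 = (pvDiffs l).getD ((pvDiffs l).length - 1 - k) 0 := by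
  have h1 : (1 : Int) + (k : Int) = ((k + 1 : Nat) : Int) := by push_cast; ring
  have h2 : ((k + 1 : Nat) : Int) - 1 = ((k : Nat) : Int) := by push_cast; ring
  rw [h1, h2]
  simp only [PySem.List.pyGetD_natCast, beq_iff_eq]
  rw [pv_getD_reverse l (k + 1) ' ' (by omega), pv_getD_reverse l k ' ' (by omega),
      pvDiffs_getD l k hk, pvDiffs_length,
      pvDiffs_getD l (l.length - 1 - 1 - k) (by omega),
      show l.length - 1 - (k + 1) = l.length - 1 - 1 - k by omega,
      show l.length - 1 - 1 - k + 1 = l.length - 1 - k by omega]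
  omega

-- A returns "Funny" exactly when the diff list is a palindrome
theorem pv_key (l : List Char) (h : 2 ≤ l.length) :
    ((PySem.List.pyRange 1 l.length 1).all (fun i =>
        (((PySem.List.pyGetD l i ' ').toNat : Int) - ((PySem.List.pyGetD l (i - 1) ' ').toNat : Int)).natAbs
          == (((PySem.List.pyGetD l.reverse i ' ').toNat : Int) - ((PySem.List.pyGetD l.reverse (i - 1) ' ').toNat : Int)).natAbs))
      = true ↔ pvDiffs l = (pvDiffs l).reverse := by
  rw [PySem.List.pyRange_one, List.all_map, List.all_eq_true, pv_palindrome_iff]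
  constructor
  · intro hall j hj
    have hj' : j < l.length - 1 := by rwa [pvDiffs_length] at hj
    exact (pv_step l j hj').mp (hall j (List.mem_range.mpr (by omega)))
  · intro hp k hk
    have hk' : k < l.length - 1 := by have := List.mem_range.mp hk; omega
    exact (pv_step l k hk').mpr (hp k (by rwa [pvDiffs_length]))

-- B-side: the two-pointer loop from i checks exactly the remaining half mirror equalities
theorem pv_loop_iff (l : List Char) : ∀ (m i : Nat), l.length - 1 - i - i ≤ m →
    (pvLoop l i (l.length - 1 - i) = true ↔
      ∀ k, i ≤ k → 2 * k < l.length - 1 →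
        (pvDiffs l).getD k 0 = (pvDiffs l).getD (l.length - 2 - k) 0) := by
  intro m
  induction m with
  | zero =>
    intro i hm
    rw [pvLoop, if_neg (by omega)]
    constructor
    · intro _ k hk1 hk2; omega
    · intro _; rfl
  | succ m ih =>
    intro i hm
    by_cases hlt : i < l.length - 1 - i
    · rw [pvLoop, if_pos hlt]
      have hn : 2 ≤ l.length := by omega
      have hi : i < l.length - 1 := by omega
      have hj : l.length - 2 - i < l.length - 1 := by omega
      have hcheck :
          ((((l.getD (i + 1) ' ').toNat : Int) - ((l.getD i ' ').toNat : Int)).natAbs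
            == (((l.getD (l.length - 1 - i) ' ').toNat : Int) -
                ((l.getD (l.length - 1 - i - 1) ' ').toNat : Int)).natAbs)
          = ((pvDiffs l).getD i 0 == (pvDiffs l).getD (l.length - 2 - i) 0) := by
        rw [pvDiffs_getD l i hi, pvDiffs_getD l (l.length - 2 - i) hj,
            show l.length - 2 - i + 1 = l.length - 1 - i from by omega,
            show l.length - 1 - i - 1 = l.length - 2 - i from by omega]
      rw [hcheck]
      by_cases heq : (pvDiffs l).getD i 0 = (pvDiffs l).getD (l.length - 2 - i) 0
      · rw [if_pos (by simpa using heq),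
            show l.length - 1 - i - 1 = l.length - 1 - (i + 1) from by omega,
            ih (i + 1) (by omega)]
        constructor
        · intro h k hk1 hk2
          rcases Nat.eq_or_lt_of_le hk1 with rfl | hk
          · exact heq
          · exact h k hk hk2
        · intro h k hk1 hk2; exact h k (by omega) hk2
      · rw [if_neg (by simpa using heq)]
        constructor
        · intro h; exact absurd h (by simp)
        · intro h; exact absurd (h i le_rfl (by omega)) heq
    · rw [pvLoop, if_neg hlt]
      constructor
      · intro _ k hk1 hk2; omega
      · intro _; rfl

-- ===== VERDICT (by name: the statement is the Claim_ definition above) =====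
theorem is_funny_string_spec : Claim_equal_is_funny_string := by
  intro s _
  unfold Spec_is_funny_string is_funny_string is_funny_string_alt
  dsimp only
  by_cases hlen : s.toList.length < 2
  · rw [if_pos hlen, if_pos hlen]
  · rw [if_neg hlen, if_neg hlen]
    set l := s.toList with hl
    have hkey := pv_key l (by omega)
    have hloop := pv_loop_iff l (l.length - 1) 0 (by omega)
    rw [Nat.sub_zero] at hloop
    have hhalf := pv_half_palindrome (pvDiffs l)
    rw [pvDiffs_length] at hhalf
    have hBiff : pvLoop l 0 (l.length - 1) = true ↔ pvDiffs l = (pvDiffs l).reverse := by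
      rw [hloop, hhalf]
      constructor
      · intro h k hk
        rw [show l.length - 1 - 1 - k = l.length - 2 - k from by omega]
        exact h k (Nat.zero_le k) hk
      · intro h k _ hk
        rw [show l.length - 2 - k = l.length - 1 - 1 - k from by omega]
        exact h k hk
    by_cases hB : pvLoop l 0 (l.length - 1) = true
    · rw [if_pos hB, if_pos (hkey.mpr (hBiff.mp hB))]
    · rw [if_neg hB, if_neg (fun hc => hB (hBiff.mpr (hkey.mp hc)))]
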